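-- pv_equiv track=rewrite | github.com/justinxu421/advent | advent_2019/day24.py | get_adj2
-- ===== SOURCE A (Python) =====
-- def get_adj2(x):
-- 	i,j,l = x
-- 	adj = []
-- 	# top
-- 	if (i-1,j) == (2,2):
-- 		for x in range(5):
-- 			adj.append((4,x,l+1))
-- 	else:
-- 		# top edge
-- 		if i == 0:
-- 			adj.append((1,2,l-1))
-- 		else:
-- 			adj.append((i-1,j,l))
--
-- 	# down
-- 	if (i+1,j) == (2,2):
-- 		for x in range(5):
-- 			adj.append((0,x,l+1))
-- 	else:
-- 		# bottom edge
-- 		if i == 4: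
-- 			adj.append((3,2,l-1))
-- 		else:
-- 			adj.append((i+1,j,l))
--
-- 	# left
-- 	if (i,j-1) == (2,2):
-- 		for x in range(5):
-- 			adj.append((x,4,l+1))
-- 	else:
-- 		# left edge
-- 		if j == 0:
-- 			adj.append((2,1,l-1))
-- 		else:
-- 			adj.append((i,j-1,l))
--
-- 	# right
-- 	if (i,j+1) == (2,2):
-- 		for x in range(5):
-- 			adj.append((x,0,l+1))
-- 	else:
-- 		# right edge
-- 		if j == 4:
-- 			adj.append((2,3,l-1))
-- 		else:
-- 			adj.append((i,j+1,l))
--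
-- 	return adj
-- ===== SOURCE B (Python) =====
-- def get_adj2(x):
--     i, j, l = x
--     # Implement only the "up" direction; derive down/left/right from it by the
--     # grid symmetries flip (vertical mirror) and swap (transpose).
--     def up(i, j, l):
--         if (i - 1, j) == (2, 2):
--             return [(4, t, l + 1) for t in range(5)]
--         if i == 0:
--             return [(1, 2, l - 1)]
--         return [(i - 1, j, l)]
--
--     def flip(c):
--         return (4 - c[0], c[1], c[2])
--
--     def swap(c):
--         return (c[1], c[0], c[2])
--
--     return (up(i, j, l)
--             + [flip(c) for c in up(4 - i, j, l)]
--             + [swap(c) for c in up(j, i, l)]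
--             + [swap(flip(c)) for c in up(4 - j, i, l)])
-- ===== Notes on version B (the rewrite author's own statement) =====
-- stated objective: simpler
-- what changed: B implements only the single 'up' direction and obtains the other three directions by conjugating that helper with the grid symmetries mirror (i -> 4-i) and transpose (swap i,j), instead of A's four copy-pasted three-way branch blocks.
import Mathlib
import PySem

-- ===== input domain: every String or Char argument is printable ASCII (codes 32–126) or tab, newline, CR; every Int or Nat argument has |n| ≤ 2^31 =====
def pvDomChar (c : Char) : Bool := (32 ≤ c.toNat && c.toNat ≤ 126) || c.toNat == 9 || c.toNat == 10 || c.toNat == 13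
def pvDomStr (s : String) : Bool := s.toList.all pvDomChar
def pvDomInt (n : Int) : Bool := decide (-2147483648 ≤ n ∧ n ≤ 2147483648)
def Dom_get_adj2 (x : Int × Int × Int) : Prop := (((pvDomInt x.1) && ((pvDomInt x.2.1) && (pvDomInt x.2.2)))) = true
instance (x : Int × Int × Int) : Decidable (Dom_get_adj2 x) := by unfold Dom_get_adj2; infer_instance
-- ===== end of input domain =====

-- B implements only the "up" direction and derives down/left/right from it via the
-- grid symmetries mirror and transpose (objective: simpler decomposition; same cost).

-- ===== PORT A =====
def get_adj2 (x : Int × Int × Int) : List (Int × Int × Int) :=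
  let i := x.1; let j := x.2.1; let l := x.2.2
  let adj : List (Int × Int × Int) := []
  -- top
  let adj :=
    if i - 1 = 2 ∧ j = 2 then
      (PySem.List.pyRange 0 5 1).foldl (fun a t => a ++ [((4 : Int), t, l + 1)]) adj
    else if i = 0 then adj ++ [(1, 2, l - 1)] else adj ++ [(i - 1, j, l)]
  -- down
  let adj :=
    if i + 1 = 2 ∧ j = 2 then
      (PySem.List.pyRange 0 5 1).foldl (fun a t => a ++ [((0 : Int), t, l + 1)]) adj
    else if i = 4 then adj ++ [(3, 2, l - 1)] else adj ++ [(i + 1, j, l)]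
  -- left
  let adj :=
    if i = 2 ∧ j - 1 = 2 then
      (PySem.List.pyRange 0 5 1).foldl (fun a t => a ++ [(t, (4 : Int), l + 1)]) adj
    else if j = 0 then adj ++ [(2, 1, l - 1)] else adj ++ [(i, j - 1, l)]
  -- right
  let adj :=
    if i = 2 ∧ j + 1 = 2 then
      (PySem.List.pyRange 0 5 1).foldl (fun a t => a ++ [(t, (0 : Int), l + 1)]) adj
    else if j = 4 then adj ++ [(2, 3, l - 1)] else adj ++ [(i, j + 1, l)]
  adj

-- ===== PORT B =====
-- the single "up" direction (B's helper `up`)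
def pvUp (i j l : Int) : List (Int × Int × Int) :=
  if i - 1 = 2 ∧ j = 2 then (PySem.List.pyRange 0 5 1).map (fun t => ((4 : Int), t, l + 1))
  else if i = 0 then [(1, 2, l - 1)]
  else [(i - 1, j, l)]

def pvFlip (c : Int × Int × Int) : Int × Int × Int := (4 - c.1, c.2.1, c.2.2)

def pvSwap (c : Int × Int × Int) : Int × Int × Int := (c.2.1, c.1, c.2.2)

def get_adj2_alt (x : Int × Int × Int) : List (Int × Int × Int) :=
  let i := x.1; let j := x.2.1; let l := x.2.2
  pvUp i j l
    ++ (pvUp (4 - i) j l).map pvFlip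
    ++ (pvUp j i l).map pvSwap
    ++ (pvUp (4 - j) i l).map (fun c => pvSwap (pvFlip c))

-- ===== PRECONDITION & SPEC =====
def Spec_get_adj2 (x : Int × Int × Int) (out : List (Int × Int × Int)) : Prop := out = get_adj2_alt x
instance (x : Int × Int × Int) (out : List (Int × Int × Int)) : Decidable (Spec_get_adj2 x out) := by unfold Spec_get_adj2; infer_instance

-- ===== CLAIM (what is proved, stated in full; the proofs are below) =====
def Claim_equal_get_adj2 : Prop := ∀ (x : Int × Int × Int), Dom_get_adj2 x → Spec_get_adj2 x (get_adj2 x)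

-- ===== LEMMAS AND PROOFS =====
theorem pyRange05 : PySem.List.pyRange 0 5 1 = [0, 1, 2, 3, 4] := by decide

theorem if3_append {α : Type} (c c' : Prop) [Decidable c] [Decidable c']
    (adj X Y Z : List α) :
    (if c then adj ++ X else if c' then adj ++ Y else adj ++ Z)
      = adj ++ (if c then X else if c' then Y else Z) := by
  split_ifs <;> rfl

-- ===== VERDICT (by name: the statement is the Claim_ definition above) =====
set_option maxHeartbeats 1000000 in
theorem get_adj2_spec : Claim_equal_get_adj2 := by
  rintro ⟨i, j, l⟩ _
  show get_adj2 (i, j, l) = get_adj2_alt (i, j, l)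
  simp only [get_adj2, get_adj2_alt, pvUp, pvFlip, pvSwap, pyRange05, List.foldl,
    PySem.List.foldl_append_singleton_eq_map,
    if3_append, List.map, List.nil_append, List.append_assoc]
  congr 1
  congr 1
  · split_ifs <;> simp [pvFlip] <;> omega
  congr 1
  · split_ifs <;> simp [pvSwap] <;> omega
  · split_ifs <;> simp [pvSwap, pvFlip] <;> omega
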